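-- pv_equiv track=rewrite | github.com/IES-Rafael-Alberti/2425-u2-2-2-sentencias-iterativas-AdriFdezz | src/Ejercicio2.2.8.py | generarTriangulo
-- ===== SOURCE A (Python) =====
-- def generarTriangulo(numero: int) -> list:
--     """
--     Genera un triangulo rectangulo.
--
--     Args:
--         numero (int): La altura del triangulo.
--
--     Returns:
--         list: Una lista de listas, donde cada lista contiene los numeros de cada fila del triangulo.
--     """
--     triangulo = []
--     for fila in range(1, numero + 1):
--         numeros = []
--         for valor in range(1, fila + 1):
--             numeros.append(2 * valor - 1)
--         triangulo.append(numeros[::-1])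
--     return triangulo
-- ===== SOURCE B (Python) =====
-- def generarTriangulo(numero: int) -> list:
--     """Builds each row incrementally from the previous row: prepend the new
--     odd number to a running row instead of recomputing and reversing."""
--     triangulo = []
--     fila_actual = []
--     for fila in range(1, numero + 1):
--         fila_actual = [2 * fila - 1] + fila_actual
--         triangulo.append(fila_actual)
--     return triangulo
-- ===== Notes on version B (the rewrite author's own statement) =====
-- stated objective: alternative
-- what changed: B maintains one running row across the outer loop, prepending the next odd number each iteration, instead of recomputing every row with an inner loop and then reversing it.
import Mathlib
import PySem

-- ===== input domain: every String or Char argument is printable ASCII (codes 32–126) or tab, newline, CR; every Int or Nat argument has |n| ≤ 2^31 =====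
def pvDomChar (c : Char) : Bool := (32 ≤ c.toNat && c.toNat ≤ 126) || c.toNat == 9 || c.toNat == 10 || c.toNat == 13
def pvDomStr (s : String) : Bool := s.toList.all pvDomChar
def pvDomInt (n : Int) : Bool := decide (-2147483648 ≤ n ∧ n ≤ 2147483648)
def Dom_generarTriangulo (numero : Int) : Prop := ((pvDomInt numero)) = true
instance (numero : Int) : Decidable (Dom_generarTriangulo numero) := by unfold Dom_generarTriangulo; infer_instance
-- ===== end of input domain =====

-- B builds each row by prepending the next odd number to the previous row, removing A's inner loop and reverse (objective: alternative).

-- ===== PORT A =====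
def generarTriangulo (numero : Int) : List (List Int) :=
  (PySem.List.pyRange 1 (numero + 1) 1).foldl
    (fun triangulo fila =>
      let numeros := (PySem.List.pyRange 1 (fila + 1) 1).foldl
        (fun ns valor => ns ++ [2 * valor - 1]) []
      -- numeros[::-1]: slice? with step -1 never fails, getD is never taken
      triangulo ++ [(PySem.List.slice? numeros none none (-1)).getD []])
    []

-- ===== PORT B =====
def generarTriangulo_alt (numero : Int) : List (List Int) :=
  ((PySem.List.pyRange 1 (numero + 1) 1).foldl
    (fun (st : List (List Int) × List Int) fila =>
      let filaActual := (2 * fila - 1) :: st.2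
      (st.1 ++ [filaActual], filaActual))
    ([], [])).1

-- ===== PRECONDITION & SPEC =====
def Spec_generarTriangulo (numero : Int) (out : List (List Int)) : Prop := out = generarTriangulo_alt numero
instance (numero : Int) (out : List (List Int)) : Decidable (Spec_generarTriangulo numero out) := by unfold Spec_generarTriangulo; infer_instance

-- ===== CLAIM (what is proved, stated in full; the proofs are below) =====
def Claim_equal_generarTriangulo : Prop := ∀ (numero : Int), Dom_generarTriangulo numero → Spec_generarTriangulo numero (generarTriangulo numero)

-- ===== LEMMAS AND PROOFS =====

-- the row of height k, as B builds it
def pvRow : Nat → List Int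
  | 0 => []
  | k + 1 => (2 * ((k : Int) + 1) - 1) :: pvRow k

-- A's inner loop, reversed, is pvRow
lemma pvInner (k : Nat) :
    ((PySem.List.pyRange 1 ((k : Int) + 1) 1).foldl
      (fun ns valor => ns ++ [2 * valor - 1]) []).reverse = pvRow k := by
  induction k with
  | zero => simp [PySem.List.pyRange_one_eq_nil, pvRow]
  | succ k ih =>
    rw [show ((k + 1 : Nat) : Int) + 1 = ((k : Int) + 1) + 1 by push_cast; ring,
        PySem.List.pyRange_one_succ_right (by omega),
        List.foldl_append]
    simp only [List.foldl_cons, List.foldl_nil, List.reverse_append, List.reverse_cons,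
      List.reverse_nil, List.nil_append, List.singleton_append, pvRow, ← ih]

lemma pvA (k : Nat) :
    (PySem.List.pyRange 1 ((k : Int) + 1) 1).foldl
      (fun triangulo fila =>
        triangulo ++ [(PySem.List.slice? ((PySem.List.pyRange 1 (fila + 1) 1).foldl
          (fun ns valor => ns ++ [2 * valor - 1]) []) none none (-1)).getD []])
      [] = (List.range k).map (fun j => pvRow (j + 1)) := by
  induction k with
  | zero => simp [PySem.List.pyRange_one_eq_nil]
  | succ k ih =>
    rw [show ((k + 1 : Nat) : Int) + 1 = ((k : Int) + 1) + 1 by push_cast; ring,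
        PySem.List.pyRange_one_succ_right (by omega),
        List.foldl_append, ih, List.range_succ]
    have h := pvInner (k + 1)
    rw [show ((k + 1 : Nat) : Int) = (k : Int) + 1 by push_cast; ring] at h
    simp only [List.foldl_cons, List.foldl_nil, PySem.List.slice?_none_none_neg_one,
      Option.getD_some, h, List.map_append, List.map_cons, List.map_nil]

lemma pvB (k : Nat) :
    (PySem.List.pyRange 1 ((k : Int) + 1) 1).foldl
      (fun (st : List (List Int) × List Int) fila =>
        ((st.1 ++ [(2 * fila - 1) :: st.2], (2 * fila - 1) :: st.2) : List (List Int) × List Int))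
      ([], []) = ((List.range k).map (fun j => pvRow (j + 1)), pvRow k) := by
  induction k with
  | zero => simp [PySem.List.pyRange_one_eq_nil, pvRow]
  | succ k ih =>
    rw [show ((k + 1 : Nat) : Int) + 1 = ((k : Int) + 1) + 1 by push_cast; ring,
        PySem.List.pyRange_one_succ_right (by omega),
        List.foldl_append, ih, List.range_succ]
    simp only [List.foldl_cons, List.foldl_nil, pvRow, List.map_append, List.map_cons, List.map_nil]

-- ===== VERDICT (by name: the statement is the Claim_ definition above) =====
theorem generarTriangulo_spec : Claim_equal_generarTriangulo := by
  intro numero _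
  unfold Spec_generarTriangulo generarTriangulo generarTriangulo_alt
  by_cases h : numero ≤ 0
  · rw [PySem.List.pyRange_one_eq_nil (by omega)]
    rfl
  · obtain ⟨k, rfl⟩ : ∃ k : Nat, numero = (k : Int) :=
      ⟨numero.toNat, (Int.toNat_of_nonneg (by omega)).symm⟩
    rw [pvA, pvB]
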